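-- pv_equiv track=rewrite | github.com/danielgonzagat/act | atos_core/cognitive_composition_v161.py | detail_injector
-- ===== SOURCE A (Python) =====
-- from typing import Any, Callable, Dict, List, Optional, Set, Tuple, Union
--
-- GridV124 = List[List[int]]
--
-- def _grid_shape_v161(g: GridV124) -> Tuple[int, int]:
--     """Get (height, width) of grid."""
--     if not g:
--         return (0, 0)
--     return (len(g), len(g[0]) if g[0] else 0)
--
-- def _copy_grid_v161(g: GridV124) -> GridV124:
--     """Deep copy a grid."""
--     return [[int(c) for c in row] for row in g]
--
-- def detail_injector(abstract: GridV124,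
--                     details: Dict[Tuple[int, int], int]) -> GridV124:
--     """
--     Injeta detalhes específicos em posições.
--
--     Papel: Adiciona valores pontuais à abstração.
--     Justificativa: Detalhes específicos completam a transformação.
--     """
--     result = _copy_grid_v161(abstract)
--     h, w = _grid_shape_v161(result)
--
--     for (r, c), value in details.items():
--         if 0 <= r < h and 0 <= c < w:
--             result[r][c] = int(value)
--
--     return result
-- ===== SOURCE B (Python) =====
-- def detail_injector(abstract, details):
--     return [
--         [int(details.get((i, j), cell)) for j, cell in enumerate(row)]
--         for i, row in enumerate(abstract)
--     ]
-- ===== Notes on version B (the rewrite author's own statement) =====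
-- stated objective: simpler
-- what changed: Instead of deep-copying the grid and then iterating the details dict with explicit bounds checks and in-place assignment, B builds the result in one nested comprehension over the grid cells, probing the dict per cell with details.get((i,j), cell); out-of-range keys simply never match.
-- outside the precondition, e.g. on detail_injector([[1], [2, 3]], {(1, 1): 5}): A returns [[1], [2, 3]], B returns [[1], [2, 5]]
import Mathlib
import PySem

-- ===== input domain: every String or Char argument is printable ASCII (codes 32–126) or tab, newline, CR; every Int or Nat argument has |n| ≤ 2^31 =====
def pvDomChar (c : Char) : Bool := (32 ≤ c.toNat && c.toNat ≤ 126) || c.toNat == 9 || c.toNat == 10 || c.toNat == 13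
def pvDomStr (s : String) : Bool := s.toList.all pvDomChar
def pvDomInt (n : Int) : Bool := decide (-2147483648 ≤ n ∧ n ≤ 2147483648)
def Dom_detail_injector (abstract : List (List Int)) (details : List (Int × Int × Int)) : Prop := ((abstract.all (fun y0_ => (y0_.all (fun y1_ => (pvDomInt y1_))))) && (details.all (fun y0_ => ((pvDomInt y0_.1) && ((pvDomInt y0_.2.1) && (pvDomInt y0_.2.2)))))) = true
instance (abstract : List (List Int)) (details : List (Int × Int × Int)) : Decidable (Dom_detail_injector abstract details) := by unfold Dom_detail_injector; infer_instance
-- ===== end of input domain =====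

-- B replaces A's copy-then-overwrite (iterate the dict, bounds-check, assign in place) by one
-- nested comprehension over the grid that probes the dict per cell — simpler, no bounds checks.

-- ===== PORT A =====
-- loop body of A's `for (r, c), value in details.items(): if 0 <= r < h and 0 <= c < w: result[r][c] = int(value)`
def stepA (h w : Int) (res : List (List Int)) (e : Int × Int × Int) : List (List Int) :=
  if 0 ≤ e.1 ∧ e.1 < h ∧ 0 ≤ e.2.1 ∧ e.2.1 < w then
    res.modify e.1.toNat (fun row => row.set e.2.1.toNat e.2.2)
  else res

def detail_injector (abstract : List (List Int)) (details : List (Int × Int × Int)) : List (List Int) :=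
  -- result = _copy_grid_v161(abstract)   (int(c) is the identity on Int)
  let result := abstract.map (fun row => row.map (fun c => c))
  -- h, w = _grid_shape_v161(result)
  let h : Int := (result.length : Int)
  let w : Int := match result with
    | [] => 0
    | r0 :: _ => if r0 = [] then 0 else (r0.length : Int)
  details.foldl (stepA h w) result

-- ===== PORT B =====
-- details.get((r, c), default): first (only) matching key in the association list
def dget? (details : List (Int × Int × Int)) (r c : Int) : Option Int :=
  match details with
  | [] => none
  | e :: rest => if e.1 = r ∧ e.2.1 = c then some e.2.2 else dget? rest r c

def detail_injector_alt (abstract : List (List Int)) (details : List (Int × Int × Int)) : List (List Int) :=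
  (PySem.List.enumerate abstract).map (fun p =>
    (PySem.List.enumerate p.2).map (fun q =>
      match dget? details p.1 q.1 with
      | some v => v
      | none => q.2))

-- ===== PRECONDITION & SPEC =====
-- Pre_ excludes detail lists with duplicate keys (a Python dict cannot contain them; first-match
-- vs last-write would differ) and detail entries landing on a ragged grid where row 0's width (A's
-- bounds check) disagrees with the target row's real length — there A raises IndexError (column
-- past a shorter row) or silently skips a cell of a longer row that a per-row pass fills.
def Pre_detail_injector (abstract : List (List Int)) (details : List (Int × Int × Int)) : Prop :=
  (details.map (fun e => (e.1, e.2.1))).Nodup ∧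
  ∀ e ∈ details, (0 ≤ e.1 ∧ e.1 < (abstract.length : Int) ∧ 0 ≤ e.2.1) →
    (e.2.1 < ((abstract.headD []).length : Int) ↔
     e.2.1 < (((abstract.getD e.1.toNat []).length : Int)))
instance (abstract : List (List Int)) (details : List (Int × Int × Int)) : Decidable (Pre_detail_injector abstract details) := by unfold Pre_detail_injector; infer_instance

def pvWitness_detail_injector : List (List Int) × (List (Int × Int × Int)) :=
  ([[1, 2], [3, 4]], [(0, 1, 9), (5, 5, 7)])

def Spec_detail_injector (abstract : List (List Int)) (details : List (Int × Int × Int)) (out : List (List Int)) : Prop := out = detail_injector_alt abstract details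
instance (abstract : List (List Int)) (details : List (Int × Int × Int)) (out : List (List Int)) : Decidable (Spec_detail_injector abstract details out) := by unfold Spec_detail_injector; infer_instance

-- ===== CLAIM (what is proved, stated in full; the proofs are below) =====
def Claim_equal_detail_injector : Prop := ∀ (abstract : List (List Int)) (details : List (Int × Int × Int)), Dom_detail_injector abstract details → Pre_detail_injector abstract details → Spec_detail_injector abstract details (detail_injector abstract details)

-- ===== LEMMAS AND PROOFS =====

-- cell value with defaults (used only by the proofs)
def cellv (g : List (List Int)) (i j : Nat) : Int := (g.getD i []).getD j 0

theorem stepA_length (h w : Int) (res : List (List Int)) (e : Int × Int × Int) :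
    (stepA h w res e).length = res.length := by
  unfold stepA; split <;> simp

theorem foldA_length (h w : Int) (ds : List (Int × Int × Int)) :
    ∀ g : List (List Int), (List.foldl (stepA h w) g ds).length = g.length := by
  induction ds with
  | nil => intro g; rfl
  | cons e rest ih => intro g; simpa [List.foldl_cons, stepA_length] using ih (stepA h w g e)

theorem stepA_rowlen (h w : Int) (res : List (List Int)) (e : Int × Int × Int) (i : Nat) :
    ((stepA h w res e).getD i []).length = (res.getD i []).length := by
  unfold stepA
  split
  · simp only [List.getD_eq_getElem?_getD, List.getElem?_modify]
    cases hres : res[i]? with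
    | none => simp
    | some row => by_cases hi : e.1.toNat = i <;> simp [hi]
  · rfl

theorem foldA_rowlen (h w : Int) (ds : List (Int × Int × Int)) :
    ∀ (g : List (List Int)) (i : Nat),
      ((List.foldl (stepA h w) g ds).getD i []).length = (g.getD i []).length := by
  induction ds with
  | nil => intro g i; rfl
  | cons e rest ih =>
      intro g i
      rw [List.foldl_cons, ih (stepA h w g e) i, stepA_rowlen]

theorem dget?_cons (e : Int × Int × Int) (rest : List (Int × Int × Int)) (r c : Int) :
    dget? (e :: rest) r c = if e.1 = r ∧ e.2.1 = c then some e.2.2 else dget? rest r c := rfl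

theorem dget?_eq_none_of_not_mem (ds : List (Int × Int × Int)) (r c : Int)
    (hmem : (r, c) ∉ ds.map (fun e => (e.1, e.2.1))) : dget? ds r c = none := by
  induction ds with
  | nil => rfl
  | cons e rest ih =>
      simp only [List.map_cons, List.mem_cons, not_or] at hmem
      unfold dget?
      have hne : ¬ (e.1 = r ∧ e.2.1 = c) := by
        intro ⟨h1, h2⟩; exact hmem.1 (by simp [h1, h2])
      simp only [hne, if_false]
      exact ih hmem.2

-- main characterisation of A's loop, cell by cell
theorem foldA_cell (hN : Nat) (wI : Int) (ds : List (Int × Int × Int)) :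
    ∀ (g : List (List Int)),
      g.length = hN →
      (ds.map (fun e => (e.1, e.2.1))).Nodup →
      (∀ e ∈ ds, (0 ≤ e.1 ∧ e.1 < (hN : Int) ∧ 0 ≤ e.2.1) →
        (e.2.1 < wI ↔ e.2.1 < ((g.getD e.1.toNat []).length : Int))) →
      ∀ (i j : Nat), i < hN → j < (g.getD i []).length →
        cellv (List.foldl (stepA (hN : Int) wI) g ds) i j
          = (dget? ds (i : Int) (j : Int)).getD (cellv g i j) := by
  induction ds with
  | nil => intro g _ _ _ i j _ _; simp [dget?]
  | cons e rest ih =>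
      intro g hlen hnd hP i j hi hj
      simp only [List.map_cons, List.nodup_cons] at hnd
      obtain ⟨hhead, hndrest⟩ := hnd
      set g' := stepA (hN : Int) wI g e with hg'
      have hlen' : g'.length = hN := by rw [hg', stepA_length, hlen]
      have hrowlen : ∀ k : Nat, (g'.getD k []).length = (g.getD k []).length := by
        intro k; rw [hg', stepA_rowlen]
      have hP' : ∀ e' ∈ rest, (0 ≤ e'.1 ∧ e'.1 < (hN : Int) ∧ 0 ≤ e'.2.1) →
          (e'.2.1 < wI ↔ e'.2.1 < ((g'.getD e'.1.toNat []).length : Int)) := by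
        intro e' he' hc
        rw [hrowlen]
        exact hP e' (List.mem_cons_of_mem _ he') hc
      have hj' : j < (g'.getD i []).length := by rw [hrowlen]; exact hj
      have hfold : List.foldl (stepA (hN : Int) wI) g (e :: rest)
          = List.foldl (stepA (hN : Int) wI) g' rest := rfl
      by_cases hkey : e.1 = (i : Int) ∧ e.2.1 = (j : Int)
      · -- the head entry writes exactly cell (i, j); no later entry touches it
        have hnone : dget? rest (i : Int) (j : Int) = none := by
          apply dget?_eq_none_of_not_mem
          intro hmem
          exact hhead (by simpa [hkey.1, hkey.2] using hmem)
        have hbase : 0 ≤ e.1 ∧ e.1 < (hN : Int) ∧ 0 ≤ e.2.1 := by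
          refine ⟨by simp [hkey.1], by simp [hkey.1]; exact_mod_cast hi, by simp [hkey.2]⟩
        have hcw : e.2.1 < wI := by
          have hiff := hP e List.mem_cons_self hbase
          rw [hkey.1, hkey.2, Int.toNat_natCast] at hiff
          rw [hkey.2]
          exact hiff.mpr (by exact_mod_cast hj)
        have hcond : 0 ≤ e.1 ∧ e.1 < (hN : Int) ∧ 0 ≤ e.2.1 ∧ e.2.1 < wI :=
          ⟨hbase.1, hbase.2.1, hbase.2.2, hcw⟩
        have hg'2 : g' = g.modify i (fun row => row.set j e.2.2) := by
          rw [hg']; unfold stepA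
          rw [if_pos hcond, hkey.1, hkey.2, Int.toNat_natCast, Int.toNat_natCast]
        have hcellg' : cellv g' i j = e.2.2 := by
          have hilen : i < g.length := by omega
          have hjl2 : j < (g[i]).length := by
            have h2 := hj
            rw [List.getD_eq_getElem _ _ hilen] at h2
            exact h2
          rw [hg'2]
          unfold cellv
          simp only [List.getD_eq_getElem?_getD, List.getElem?_modify,
            List.getElem?_eq_getElem hilen]
          simp [hjl2]
        rw [hfold, ih g' hlen' hndrest hP' i j hi hj', hnone, hcellg', dget?_cons]
        simp [hkey.1, hkey.2]
      · -- the head entry does not touch cell (i, j)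
        have hcell : cellv g' i j = cellv g i j := by
          rw [hg']; unfold stepA
          split
          · unfold cellv
            simp only [List.getD_eq_getElem?_getD, List.getElem?_modify]
            by_cases hri : e.1.toNat = i
            · rename_i hcond
              have hr : e.1 = (i : Int) := by omega
              have hc : e.2.1 ≠ (j : Int) := fun hcc => hkey ⟨hr, hcc⟩
              have hcn : e.2.1.toNat ≠ j := by omega
              simp only [hri]
              cases hx : g[i]? with
              | none => simp
              | some row => simp [hcn]
            · simp [hri]
          · rfl
        have hdg : dget? (e :: rest) (i : Int) (j : Int) = dget? rest (i : Int) (j : Int) := by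
          rw [dget?_cons, if_neg hkey]
        rw [hfold, ih g' hlen' hndrest hP' i j hi hj', hcell, hdg]

-- B's value cell by cell
theorem alt_getElem (abstract : List (List Int)) (details : List (Int × Int × Int))
    (i j : Nat) (hi : i < abstract.length) (hj : j < (abstract[i]).length)
    (h1 : i < (detail_injector_alt abstract details).length)
    (h2 : j < ((detail_injector_alt abstract details)[i]).length) :
    (detail_injector_alt abstract details)[i][j]
      = (dget? details (i : Int) (j : Int)).getD (abstract[i][j]) := by
  unfold detail_injector_alt
  simp only [List.getElem_map, PySem.List.getElem_enumerate, zero_add]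
  cases hd : dget? details (i : Int) (j : Int) <;> simp

theorem alt_length (abstract : List (List Int)) (details : List (Int × Int × Int)) :
    (detail_injector_alt abstract details).length = abstract.length := by
  unfold detail_injector_alt; simp [PySem.List.length_enumerate]

theorem alt_rowlength (abstract : List (List Int)) (details : List (Int × Int × Int))
    (i : Nat) (hi : i < abstract.length)
    (h1 : i < (detail_injector_alt abstract details).length) :
    ((detail_injector_alt abstract details)[i]).length = (abstract[i]).length := by
  unfold detail_injector_alt
  simp [PySem.List.getElem_enumerate, PySem.List.length_enumerate]

theorem cellv_eq_getElem (g : List (List Int)) (i j : Nat)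
    (hi : i < g.length) (hj : j < (g[i]).length) : cellv g i j = g[i][j] := by
  unfold cellv
  rw [List.getD_eq_getElem _ _ hi, List.getD_eq_getElem _ _ hj]

-- ===== VERDICT (by name: the statement is the Claim_ definition above) =====
theorem detail_injector_spec : Claim_equal_detail_injector := by
  intro abstract details _ hpre
  obtain ⟨hnd, hP⟩ := hpre
  unfold Spec_detail_injector
  -- A's result is a fold of stepA over the uncopied grid with the true dimensions
  set hN := abstract.length with hhN
  set wN := (abstract.headD []).length with hwN
  have hcopy : abstract.map (fun row => row.map (fun c => c)) = abstract := by
    simp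
  have hA : detail_injector abstract details
      = List.foldl (stepA (hN : Int) (wN : Int)) abstract details := by
    unfold detail_injector
    rw [hcopy]
    cases habs : abstract with
    | nil =>
        simp only [List.length_nil]
        have : hN = 0 := by rw [hhN, habs]; rfl
        have hw0 : wN = 0 := by rw [hwN, habs]; rfl
        rw [this, hw0]; simp
    | cons r0 tl =>
        have hh : hN = (r0 :: tl).length := by rw [hhN, habs]
        have hw : wN = r0.length := by rw [hwN, habs]; rfl
        by_cases h0 : r0 = ([] : List Int)
        · simp only [if_pos h0]
          rw [hh, hw, h0]; rfl
        · simp only [if_neg h0]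
          rw [hh, hw]
  have hAlen : (detail_injector abstract details).length = abstract.length := by
    rw [hA, foldA_length]
  have hArow : ∀ i : Nat, ((detail_injector abstract details).getD i []).length
      = (abstract.getD i []).length := by
    intro i; rw [hA, foldA_rowlen]
  apply List.ext_getElem
  · rw [hAlen, alt_length]
  · intro i hiA hiB
    have hi : i < abstract.length := by rw [← hAlen]; exact hiA
    have habD : abstract.getD i [] = abstract[i] := List.getD_eq_getElem _ _ hi
    have hAr : ((detail_injector abstract details)[i]).length = (abstract[i]).length := by
      have h2 := hArow i
      rw [List.getD_eq_getElem _ _ hiA, habD] at h2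
      exact h2
    apply List.ext_getElem
    · rw [hAr, alt_rowlength abstract details i hi hiB]
    · intro j hjA hjB
      have hjab : j < (abstract[i]).length := by rw [← hAr]; exact hjA
      have hjD : j < (abstract.getD i []).length := by rw [habD]; exact hjab
      rw [← cellv_eq_getElem _ i j hiA hjA, hA,
          foldA_cell hN ((wN : Nat) : Int) details abstract rfl hnd hP i j hi hjD,
          alt_getElem abstract details i j hi hjab hiB hjB,
          cellv_eq_getElem abstract i j hi hjab]
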